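-- pv_equiv track=rewrite | github.com/YuyangXueEd/STACE | aust/src/agents/code_synthesizer.py | _extract_error_summary
-- ===== SOURCE A (Python) =====
-- def _extract_error_summary(stderr: str) -> str:
--     """Extract brief error summary from stderr."""
--     if not stderr:
--         return "Unknown error"
--
--     # Try to find last line with error
--     lines = stderr.strip().split("\n")
--     for line in reversed(lines):
--         line = line.strip()
--         if "Error:" in line or "Exception:" in line or "error" in line.lower():
--             return line[:200]  # Truncate to 200 chars
--
--     # Fallback: return last non-empty line
--     for line in reversed(lines):
--         line = line.strip()
--         if line:
--             return line[:200]
--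
--     return "Unknown error"
-- ===== SOURCE B (Python) =====
-- def _extract_error_summary(stderr: str) -> str:
--     """Extract brief error summary from stderr (single forward pass)."""
--     if not stderr:
--         return "Unknown error"
--
--     last_error = None
--     last_nonempty = None
--     for line in stderr.strip().split("\n"):
--         s = line.strip()
--         if "Error:" in s or "Exception:" in s or "error" in s.lower():
--             last_error = s[:200]
--         if s:
--             last_nonempty = s[:200]
--
--     if last_error is not None:
--         return last_error
--     if last_nonempty is not None:
--         return last_nonempty
--     return "Unknown error"
-- ===== Notes on version B (the rewrite author's own statement) =====
-- stated objective: simpler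
-- what changed: Replaces A's two reversed early-return scans over the lines with a single forward pass keeping two accumulators (last matching error line, last non-empty line), deciding the result after the loop.
import Mathlib
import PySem

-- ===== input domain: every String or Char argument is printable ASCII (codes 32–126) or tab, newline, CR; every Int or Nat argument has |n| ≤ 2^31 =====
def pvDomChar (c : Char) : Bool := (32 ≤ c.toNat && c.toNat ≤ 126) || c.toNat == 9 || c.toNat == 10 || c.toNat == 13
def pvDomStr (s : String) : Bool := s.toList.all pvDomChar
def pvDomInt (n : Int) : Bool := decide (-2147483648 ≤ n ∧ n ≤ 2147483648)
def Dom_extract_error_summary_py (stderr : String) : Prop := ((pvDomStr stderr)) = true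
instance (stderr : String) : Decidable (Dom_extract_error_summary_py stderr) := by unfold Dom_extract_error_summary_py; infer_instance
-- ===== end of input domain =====

-- B replaces A's two reversed early-return scans by one forward pass with two last-match accumulators (objective: simpler).

-- ===== PORT A =====
-- the error-keyword test on an (already stripped) line
def pvTest (s : List Char) : Bool :=
  PySem.Chars.isIn "Error:".toList s || PySem.Chars.isIn "Exception:".toList s
    || PySem.Chars.isIn "error".toList (PySem.Chars.lower s)

-- line[:200]
def pvTrunc (s : List Char) : List Char := PySem.List.slice s none (some 200)

-- A's 'for line in reversed(lines): … return g(strip line)' early-return loop, generic in the test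
def pvScan (p : List Char → Bool) : List (List Char) → Option (List Char)
  | [] => none
  | ln :: rest =>
    let s := PySem.Chars.strip ln
    if p s then some (pvTrunc s) else pvScan p rest

def extract_error_summary_py (stderr : String) : String :=
  if stderr.toList = [] then "Unknown error"
  else
    let lines := PySem.Chars.splitOn (PySem.Chars.strip stderr.toList) "\n".toList
    match pvScan pvTest lines.reverse with
    | some r => String.ofList r
    | none =>
      match pvScan (fun s => !s.isEmpty) lines.reverse with
      | some r => String.ofList r
      | none => "Unknown error"

-- ===== PORT B =====
-- one forward step updating the two accumulators (last_error, last_nonempty)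
def pvStep (acc : Option (List Char) × Option (List Char)) (ln : List Char) :
    Option (List Char) × Option (List Char) :=
  let s := PySem.Chars.strip ln
  (if pvTest s then some (pvTrunc s) else acc.1,
   if !s.isEmpty then some (pvTrunc s) else acc.2)

def extract_error_summary_py_alt (stderr : String) : String :=
  if stderr.toList = [] then "Unknown error"
  else
    let lines := PySem.Chars.splitOn (PySem.Chars.strip stderr.toList) "\n".toList
    let acc := lines.foldl pvStep (none, none)
    match acc.1 with
    | some r => String.ofList r
    | none =>
      match acc.2 with
      | some r => String.ofList r
      | none => "Unknown error"

-- ===== PRECONDITION & SPEC =====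
def Spec_extract_error_summary_py (stderr : String) (out : String) : Prop := out = extract_error_summary_py_alt stderr
instance (stderr : String) (out : String) : Decidable (Spec_extract_error_summary_py stderr out) := by unfold Spec_extract_error_summary_py; infer_instance

-- ===== CLAIM (what is proved, stated in full; the proofs are below) =====
def Claim_equal_extract_error_summary_py : Prop := ∀ (stderr : String), Dom_extract_error_summary_py stderr → Spec_extract_error_summary_py stderr (extract_error_summary_py stderr)

-- ===== LEMMAS AND PROOFS =====

-- A's early-return scan distributes over append: the front half wins
theorem pvScan_append (p : List Char → Bool) (xs ys : List (List Char)) :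
    pvScan p (xs ++ ys) = (pvScan p xs).or (pvScan p ys) := by
  induction xs with
  | nil => simp [pvScan]
  | cons l rest ih =>
    simp only [List.cons_append, pvScan]
    split <;> simp [ih]

-- a forward last-match fold equals A's scan over the reversed list
theorem foldl_last_match (p : List Char → Bool) (ls : List (List Char)) (init : Option (List Char)) :
    ls.foldl (fun acc ln =>
        let s := PySem.Chars.strip ln
        if p s then some (pvTrunc s) else acc) init
      = (pvScan p ls.reverse).or init := by
  induction ls generalizing init with
  | nil => simp [pvScan]
  | cons l rest ih =>
    simp only [List.foldl_cons, List.reverse_cons, ih, pvScan_append]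
    rw [Option.or_assoc]
    congr 1
    simp [pvScan]
    split <;> simp

-- ===== VERDICT (by name: the statement is the Claim_ definition above) =====
theorem extract_error_summary_py_spec : Claim_equal_extract_error_summary_py := by
  intro stderr _
  unfold Spec_extract_error_summary_py extract_error_summary_py extract_error_summary_py_alt
  by_cases h : stderr.toList = []
  · simp [h]
  · simp only [h, if_false]
    rw [show pvStep = (fun (s : Option (List Char) × Option (List Char)) (ln : List Char) =>
        ((fun acc ln => let t := PySem.Chars.strip ln; if pvTest t then some (pvTrunc t) else acc) s.1 ln,
         (fun acc ln => let t := PySem.Chars.strip ln; if !t.isEmpty then some (pvTrunc t) else acc) s.2 ln)) from rfl,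
      PySem.List.foldl_prod_mk
        (f := fun acc ln => let t := PySem.Chars.strip ln; if pvTest t then some (pvTrunc t) else acc)
        (g := fun acc ln => let t := PySem.Chars.strip ln; if !t.isEmpty then some (pvTrunc t) else acc),
      foldl_last_match pvTest, foldl_last_match (fun s => !s.isEmpty)]
    simp only [Option.or_none]
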